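-- pv_equiv track=rewrite | github.com/nal060/nicolailo | boeing-main/src/helper/utils.py | normalize_spaces
-- ===== SOURCE A (Python) =====
-- def normalize_spaces(text):
--     result = []
--     prev_was_space = False
--     for char in text:
--         if char == ' ':
--             if not prev_was_space:
--                 result.append(' ')
--             prev_was_space = True
--         else:
--             result.append(char)
--             prev_was_space = False
--     return ''.join(result)
-- ===== SOURCE B (Python) =====
-- def normalize_spaces(text):
--     out = []
--     i = 0
--     n = len(text)
--     while i < n:
--         c = text[i]
--         j = i + 1
--         while j < n and text[j] == c:
--             j += 1
--         if c == ' ':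
--             out.append(' ')
--         else:
--             out.append(text[i:j])
--         i = j
--     return ''.join(out)
-- ===== Notes on version B (the rewrite author's own statement) =====
-- stated objective: alternative
-- what changed: B scans maximal runs of equal characters (two-pointer span) and emits a single space per space-run or the whole run otherwise, instead of A's per-character state machine with a prev_was_space flag.
import Mathlib
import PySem

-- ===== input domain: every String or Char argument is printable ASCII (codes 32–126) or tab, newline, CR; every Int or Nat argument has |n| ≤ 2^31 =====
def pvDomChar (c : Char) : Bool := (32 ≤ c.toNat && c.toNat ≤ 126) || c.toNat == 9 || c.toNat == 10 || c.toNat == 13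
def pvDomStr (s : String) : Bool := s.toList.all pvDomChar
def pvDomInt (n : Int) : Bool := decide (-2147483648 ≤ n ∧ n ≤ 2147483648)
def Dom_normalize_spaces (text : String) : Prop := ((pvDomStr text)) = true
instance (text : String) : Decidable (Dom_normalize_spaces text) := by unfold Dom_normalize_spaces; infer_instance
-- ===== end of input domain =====

-- B rewrites A's per-character prev_was_space state machine as a run-at-a-time scan
-- (emit one ' ' per maximal space run, the whole run otherwise); same behaviour, alternative decomposition.

-- ===== PORT A =====
-- per-character loop, state = (result list so far, prev_was_space)
def normalize_spaces (text : String) : String :=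
  let st := text.toList.foldl
    (fun (st : List Char × Bool) char =>
      if char = ' ' then
        (if st.2 then st.1 else st.1 ++ [' '], true)
      else
        (st.1 ++ [char], false))
    ([], false)
  String.mk st.1

-- ===== PORT B =====
-- run-at-a-time: take the maximal run of the head character, emit ' ' or the run, recurse on the rest
def normSpacesRuns : List Char → List Char
  | [] => []
  | c :: rest =>
    (if c = ' ' then [' '] else c :: rest.takeWhile (· = c))
      ++ normSpacesRuns (rest.dropWhile (· = c))
termination_by l => l.length
decreasing_by
  simpa using Nat.lt_succ_of_le (List.length_dropWhile_le (· = c) rest)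

def normalize_spaces_alt (text : String) : String :=
  String.mk (normSpacesRuns text.toList)

-- ===== PRECONDITION & SPEC =====
def Spec_normalize_spaces (text : String) (out : String) : Prop := out = normalize_spaces_alt text
instance (text : String) (out : String) : Decidable (Spec_normalize_spaces text out) := by unfold Spec_normalize_spaces; infer_instance

-- ===== CLAIM (what is proved, stated in full; the proofs are below) =====
def Claim_equal_normalize_spaces : Prop := ∀ (text : String), Dom_normalize_spaces text → Spec_normalize_spaces text (normalize_spaces text)

-- ===== LEMMAS AND PROOFS =====

-- forward-recursive characterisation of A's loop output
def normFwd : List Char → Bool → List Char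
  | [], _ => []
  | c :: rest, prev =>
    if c = ' ' then
      (if prev then normFwd rest true else ' ' :: normFwd rest true)
    else c :: normFwd rest false

lemma foldl_eq_normFwd (l : List Char) (acc : List Char) (prev : Bool) :
    (l.foldl
      (fun (st : List Char × Bool) char =>
        if char = ' ' then
          (if st.2 then st.1 else st.1 ++ [' '], true)
        else
          (st.1 ++ [char], false))
      (acc, prev)).1 = acc ++ normFwd l prev := by
  induction l generalizing acc prev with
  | nil => simp [normFwd]
  | cons c rest ih =>
    by_cases hc : c = ' '
    · cases prev <;> simp [hc, normFwd, ih]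
    · simp [hc, normFwd, ih]

lemma normFwd_nonspace_run (run tail : List Char) (h : ∀ x ∈ run, x ≠ ' ') :
    normFwd (run ++ tail) false = run ++ normFwd tail false := by
  induction run with
  | nil => simp
  | cons x xs ih =>
    have hx : x ≠ ' ' := h x (by simp)
    simp [normFwd, hx, ih (fun y hy => h y (by simp [hy]))]

lemma normFwd_true_spaces (run tail : List Char) (h : ∀ x ∈ run, x = ' ') :
    normFwd (run ++ tail) true = normFwd tail true := by
  induction run with
  | nil => simp
  | cons x xs ih =>
    have hx : x = ' ' := h x (by simp)
    simp [normFwd, hx, ih (fun y hy => h y (by simp [hy]))]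

lemma normFwd_true_eq_false (l : List Char) (h : ∀ c, l.head? = some c → c ≠ ' ') :
    normFwd l true = normFwd l false := by
  cases l with
  | nil => rfl
  | cons c rest =>
    have := h c rfl
    simp [normFwd, this]

lemma head?_dropWhile_ne (p : Char → Bool) (l : List Char) (c : Char)
    (h : (l.dropWhile p).head? = some c) : p c = false := by
  induction l with
  | nil => simp [List.dropWhile] at h
  | cons a t ih =>
    cases hpa : p a with
    | true =>
      rw [List.dropWhile_cons_of_pos hpa] at h
      exact ih h
    | false =>
      rw [List.dropWhile_cons_of_neg (by simp [hpa])] at h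
      simp at h
      subst h
      exact hpa

lemma normRuns_eq_normFwd (l : List Char) : normSpacesRuns l = normFwd l false := by
  induction hn : l.length using Nat.strong_induction_on generalizing l with
  | _ n ih =>
  cases l with
  | nil => simp [normSpacesRuns, normFwd]
  | cons c rest =>
    subst hn
    have hdrop : (rest.dropWhile (· = c)).length < (c :: rest).length :=
      Nat.lt_succ_of_le (List.length_dropWhile_le (· = c) rest)
    have ihd := ih _ hdrop (rest.dropWhile (· = c)) rfl
    by_cases hc : c = ' '
    · -- space run: one ' ' then the rest past the run
      subst hc
      rw [normSpacesRuns]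
      have hsplit : (' ' :: rest) = (' ' :: rest.takeWhile (· = ' ')) ++ rest.dropWhile (· = ' ') := by
        simp [List.takeWhile_append_dropWhile]
      have hall : ∀ x ∈ (rest.takeWhile (· = ' ')), x = ' ' := by
        intro x hx
        simpa using List.mem_takeWhile_imp hx
      have h1 : normFwd (' ' :: rest) false
          = ' ' :: normFwd ((rest.takeWhile (· = ' ')) ++ rest.dropWhile (· = ' ')) true := by
        conv_lhs => rw [congrArg (fun t => normFwd t false) hsplit]
        simp [normFwd]
      rw [h1, normFwd_true_spaces _ _ hall,
        normFwd_true_eq_false _ (by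
          intro d hd hds
          have := head?_dropWhile_ne (· = ' ') rest d hd
          simp [hds] at this)]
      simp [ihd]
    · -- non-space run
      rw [normSpacesRuns]
      simp only [if_neg hc]
      have hsplit : (c :: rest) = (c :: rest.takeWhile (· = c)) ++ rest.dropWhile (· = c) := by
        simp [List.takeWhile_append_dropWhile]
      have hall : ∀ x ∈ (c :: rest.takeWhile (· = c)), x ≠ ' ' := by
        intro x hx
        rcases List.mem_cons.mp hx with h | h
        · simpa [h] using hc
        · have : x = c := by simpa using List.mem_takeWhile_imp h
          simpa [this] using hc
      conv_rhs => rw [congrArg (fun t => normFwd t false) hsplit]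
      rw [normFwd_nonspace_run _ _ hall, ihd]

-- ===== VERDICT (by name: the statement is the Claim_ definition above) =====
theorem normalize_spaces_spec : Claim_equal_normalize_spaces := by
  intro text _
  unfold Spec_normalize_spaces normalize_spaces normalize_spaces_alt
  rw [normRuns_eq_normFwd]
  simp [foldl_eq_normFwd]
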